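-- pv_equiv track=rewrite | github.com/MarianaRBrito/protocolo-hard-v4 | app.py | montar_pool_carteira
-- ===== SOURCE A (Python) =====
-- def montar_pool_carteira(scores, ranking, perfil, qtd, fixas, criticas, vencidas, pool_oficial=None):
--     if "Agressiva" in perfil:
--         alvo_pool = max(22, min(25, qtd + 8))
--     else:
--         alvo_pool = max(24, min(25, qtd + 10))
--
--     base_ordenada = []
--     if pool_oficial:
--         base_ordenada.extend(list(pool_oficial)[:25])
--     base_ordenada.extend([n for n, _ in ranking])
--
--     pool = []
--     for grupo in [criticas, vencidas, fixas, base_ordenada]: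
--         for n in grupo:
--             if n not in pool:
--                 pool.append(n)
--
--     pool = pool[:max(alvo_pool, len(set(criticas) | set(vencidas) | set(fixas)))]
--     pool = sorted(pool)
--     return pool
-- ===== SOURCE B (Python) =====
-- def montar_pool_carteira(scores, ranking, perfil, qtd, fixas, criticas, vencidas, pool_oficial=None):
--     if "Agressiva" in perfil:
--         alvo = max(22, min(25, qtd + 8))
--     else:
--         alvo = max(24, min(25, qtd + 10))
--
--     # priority pass: dedup criticas, vencidas, fixas keeping first occurrences
--     prioridade = []
--     for n in criticas + vencidas + fixas:
--         if n not in prioridade: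
--             prioridade.append(n)
--
--     # bounded fill pass: take only as many new candidates as there are free slots
--     fill = max(alvo - len(prioridade), 0)
--     base = []
--     if pool_oficial:
--         base.extend(list(pool_oficial)[:25])
--     base.extend(n for n, _ in ranking)
--
--     extra = []
--     for n in base:
--         if len(extra) >= fill:
--             break
--         if n not in prioridade and n not in extra:
--             extra.append(n)
--
--     return sorted(prioridade + extra)
-- ===== Notes on version B (the rewrite author's own statement) =====
-- stated objective: alternative
-- what changed: A dedups every candidate into one unified pool and only then slices it to the cap; B splits this into a priority dedup pass and a bounded fill pass that stops scanning candidates as soon as the free slots are filled, so the full candidate list is never deduped.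
import Mathlib
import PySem

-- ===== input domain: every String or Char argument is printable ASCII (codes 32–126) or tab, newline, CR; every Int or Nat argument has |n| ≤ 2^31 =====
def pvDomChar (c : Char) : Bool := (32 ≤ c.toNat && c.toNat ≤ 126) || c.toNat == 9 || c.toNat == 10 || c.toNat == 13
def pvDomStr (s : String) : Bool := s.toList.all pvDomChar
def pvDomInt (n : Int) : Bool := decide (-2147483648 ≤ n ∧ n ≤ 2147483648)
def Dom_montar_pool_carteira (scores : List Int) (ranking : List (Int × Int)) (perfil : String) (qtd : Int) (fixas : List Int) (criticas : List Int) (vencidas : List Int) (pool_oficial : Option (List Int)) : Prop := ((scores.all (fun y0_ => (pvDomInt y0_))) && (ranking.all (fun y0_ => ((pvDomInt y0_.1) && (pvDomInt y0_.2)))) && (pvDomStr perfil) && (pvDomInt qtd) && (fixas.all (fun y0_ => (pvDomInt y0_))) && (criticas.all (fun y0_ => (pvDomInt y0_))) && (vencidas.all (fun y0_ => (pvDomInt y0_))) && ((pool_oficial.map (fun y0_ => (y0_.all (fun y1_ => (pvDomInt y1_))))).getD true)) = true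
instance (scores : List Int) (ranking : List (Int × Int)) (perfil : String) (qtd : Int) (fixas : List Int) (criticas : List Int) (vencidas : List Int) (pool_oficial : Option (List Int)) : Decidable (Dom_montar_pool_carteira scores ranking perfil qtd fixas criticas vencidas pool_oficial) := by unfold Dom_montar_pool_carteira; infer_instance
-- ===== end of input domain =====

-- ===== PORT A =====
-- B splits A's unified dedup-then-slice into a priority dedup pass and a bounded fill pass (alternative decomposition, same result).
def montar_pool_carteira (scores : List Int) (ranking : List (Int × Int)) (perfil : String) (qtd : Int) (fixas : List Int) (criticas : List Int) (vencidas : List Int) (pool_oficial : Option (List Int)) : List Int :=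
  let alvo_pool : Int :=
    if PySem.Str.isIn "Agressiva" perfil then max 22 (min 25 (qtd + 8))
    else max 24 (min 25 (qtd + 10))
  let base_ordenada : List Int :=
    (match pool_oficial with
     | some l => if l ≠ [] then PySem.List.slice l none (some (25 : Int)) else []
     | none => []) ++ ranking.map (fun p => p.1)
  let pool : List Int :=
    [criticas, vencidas, fixas, base_ordenada].foldl
      (fun pool grupo => grupo.foldl (fun pool n => if n ∈ pool then pool else pool ++ [n]) pool) []
  let cap : Int :=
    max alvo_pool
      ((PySem.Set.union (PySem.Set.union (PySem.Set.ofList criticas) vencidas) fixas).length : Int)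
  let pool := PySem.List.slice pool none (some cap)
  PySem.List.sorted pool (fun x => x) false

-- ===== PORT B =====
-- the bounded fill loop of Source B: stop as soon as `fill` new elements were collected
def pvFill (prior : List Int) (fill : Int) : List Int → List Int → List Int
  | extra, [] => extra
  | extra, n :: rest =>
      if fill ≤ (extra.length : Int) then extra
      else if n ∉ prior ∧ n ∉ extra then pvFill prior fill (extra ++ [n]) rest
      else pvFill prior fill extra rest

def montar_pool_carteira_alt (scores : List Int) (ranking : List (Int × Int)) (perfil : String) (qtd : Int) (fixas : List Int) (criticas : List Int) (vencidas : List Int) (pool_oficial : Option (List Int)) : List Int :=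
  let alvo : Int :=
    if PySem.Str.isIn "Agressiva" perfil then max 22 (min 25 (qtd + 8))
    else max 24 (min 25 (qtd + 10))
  let prioridade : List Int :=
    (criticas ++ vencidas ++ fixas).foldl (fun acc n => if n ∈ acc then acc else acc ++ [n]) []
  let fill : Int := max (alvo - (prioridade.length : Int)) 0
  let base : List Int :=
    (match pool_oficial with
     | some l => if l ≠ [] then PySem.List.slice l none (some (25 : Int)) else []
     | none => []) ++ ranking.map (fun p => p.1)
  let extra : List Int := pvFill prioridade fill [] base
  PySem.List.sorted (prioridade ++ extra) (fun x => x) false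

-- ===== PRECONDITION & SPEC =====
def Spec_montar_pool_carteira (scores : List Int) (ranking : List (Int × Int)) (perfil : String) (qtd : Int) (fixas : List Int) (criticas : List Int) (vencidas : List Int) (pool_oficial : Option (List Int)) (out : List Int) : Prop := out = montar_pool_carteira_alt scores ranking perfil qtd fixas criticas vencidas pool_oficial
instance (scores : List Int) (ranking : List (Int × Int)) (perfil : String) (qtd : Int) (fixas : List Int) (criticas : List Int) (vencidas : List Int) (pool_oficial : Option (List Int)) (out : List Int) : Decidable (Spec_montar_pool_carteira scores ranking perfil qtd fixas criticas vencidas pool_oficial out) := by unfold Spec_montar_pool_carteira; infer_instance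

-- ===== CLAIM (what is proved, stated in full; the proofs are below) =====
def Claim_equal_montar_pool_carteira : Prop := ∀ (scores : List Int) (ranking : List (Int × Int)) (perfil : String) (qtd : Int) (fixas : List Int) (criticas : List Int) (vencidas : List Int) (pool_oficial : Option (List Int)), Dom_montar_pool_carteira scores ranking perfil qtd fixas criticas vencidas pool_oficial → Spec_montar_pool_carteira scores ranking perfil qtd fixas criticas vencidas pool_oficial (montar_pool_carteira scores ranking perfil qtd fixas criticas vencidas pool_oficial)

-- ===== LEMMAS AND PROOFS =====

-- ordered dedup of xs continuing from acc (the shape of A's inner loop and B's priority pass)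
def pvDD (acc : List Int) (xs : List Int) : List Int :=
  xs.foldl (fun acc n => if n ∈ acc then acc else acc ++ [n]) acc

-- the NEW elements such a dedup appends after acc, in order of first occurrence
def pvNew (acc : List Int) : List Int → List Int
  | [] => []
  | n :: xs => if n ∈ acc then pvNew acc xs else n :: pvNew (acc ++ [n]) xs

theorem pvDD_eq_append_new (xs acc : List Int) : pvDD acc xs = acc ++ pvNew acc xs := by
  induction xs generalizing acc with
  | nil => simp [pvDD, pvNew]
  | cons n xs ih =>
    by_cases h : n ∈ acc
    · simpa [pvDD, pvNew, h] using ih acc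
    · have hh := ih (acc ++ [n])
      simp only [pvDD, List.foldl_cons, if_neg h, pvNew] at hh ⊢
      rw [hh]; simp

theorem pvDD_append (acc xs ys : List Int) : pvDD acc (xs ++ ys) = pvDD (pvDD acc xs) ys := by
  simp [pvDD]

theorem foldl_add_eq_pvDD (xs s : List Int) : xs.foldl PySem.Set.add s = pvDD s xs := by
  induction xs generalizing s with
  | nil => rfl
  | cons n xs ih =>
    simp only [List.foldl_cons, PySem.Set.add_eq_ite, pvDD]
    exact ih _

theorem union_eq_pvDD (s t : List Int) : PySem.Set.union s t = pvDD s t := by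
  simp [PySem.Set.union, PySem.Set.update, foldl_add_eq_pvDD]

theorem ofList_eq_pvDD (xs : List Int) : PySem.Set.ofList xs = pvDD [] xs := by
  rw [PySem.Set.ofList_eq_foldl, foldl_add_eq_pvDD]

theorem pvFill_eq_take (prior : List Int) (fill : Int) (xs extra : List Int) :
    pvFill prior fill extra xs = extra ++ (pvNew (prior ++ extra) xs).take (fill.toNat - extra.length) := by
  induction xs generalizing extra with
  | nil => simp [pvFill, pvNew]
  | cons n xs ih =>
    by_cases hf : fill ≤ (extra.length : Int)
    · have h0 : fill.toNat - extra.length = 0 := by omega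
      simp [pvFill, hf, h0]
    · have hlt : extra.length < fill.toNat := by omega
      by_cases hm : n ∈ prior ++ extra
      · have hb : ¬(n ∉ prior ∧ n ∉ extra) := by simp at hm ⊢; tauto
        simp [pvFill, hf, hb, pvNew, hm, ih]
      · have hb : n ∉ prior ∧ n ∉ extra := by simp at hm; tauto
        have hk : fill.toNat - extra.length = (fill.toNat - (extra ++ [n]).length) + 1 := by
          simp; omega
        simp only [pvFill, if_neg hf, if_pos hb, pvNew, if_neg hm, ih, hk, List.take_succ_cons]
        simp

theorem take_len_append (P ex : List Int) (k : Nat) :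
    (P ++ ex).take (P.length + k) = P ++ ex.take k := by
  simp [List.take_append]

theorem pv_main (alvo : Int) (h22 : (22 : Int) ≤ alvo) (c v f base : List Int) :
    PySem.List.sorted
      (PySem.List.slice
        ([c, v, f, base].foldl
          (fun pool grupo => grupo.foldl (fun pool n => if n ∈ pool then pool else pool ++ [n]) pool) [])
        none (some (max alvo
          ((PySem.Set.union (PySem.Set.union (PySem.Set.ofList c) v) f).length : Int))))
      (fun x => x) false
    = PySem.List.sorted
        ((c ++ v ++ f).foldl (fun acc n => if n ∈ acc then acc else acc ++ [n]) []
          ++ pvFill ((c ++ v ++ f).foldl (fun acc n => if n ∈ acc then acc else acc ++ [n]) [])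
              (max (alvo - ((((c ++ v ++ f).foldl (fun acc n => if n ∈ acc then acc else acc ++ [n]) []).length : Int))) 0)
              [] base)
        (fun x => x) false := by
  have hthree : pvDD (pvDD (pvDD [] c) v) f = pvDD [] (c ++ v ++ f) := by
    rw [pvDD_append, pvDD_append]
  have hpool : [c, v, f, base].foldl
      (fun pool grupo => grupo.foldl (fun pool n => if n ∈ pool then pool else pool ++ [n]) pool) []
      = pvDD [] (c ++ v ++ f) ++ pvNew (pvDD [] (c ++ v ++ f)) base := by
    show pvDD (pvDD (pvDD (pvDD [] c) v) f) base = _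
    rw [hthree, pvDD_eq_append_new]
  have hulen : ((PySem.Set.union (PySem.Set.union (PySem.Set.ofList c) v) f).length : Int)
      = ((pvDD [] (c ++ v ++ f)).length : Int) := by
    rw [union_eq_pvDD, union_eq_pvDD, ofList_eq_pvDD, hthree]
  have hprio : (c ++ v ++ f).foldl (fun acc n => if n ∈ acc then acc else acc ++ [n]) []
      = pvDD [] (c ++ v ++ f) := rfl
  rw [hpool, hulen, hprio]
  set P := pvDD [] (c ++ v ++ f) with hP
  rw [pvFill_eq_take]
  rw [PySem.List.slice_to]
  have hcap : (max alvo (P.length : Int)).toNat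
      = P.length + (max (alvo - (P.length : Int)) 0).toNat := by omega
  rw [hcap, take_len_append]
  simp
  omega

-- ===== VERDICT (by name: the statement is the Claim_ definition above) =====
theorem montar_pool_carteira_spec : Claim_equal_montar_pool_carteira := by
  intro scores ranking perfil qtd fixas criticas vencidas pool_oficial _
  unfold Spec_montar_pool_carteira
  simp only [montar_pool_carteira, montar_pool_carteira_alt]
  exact pv_main _ (by split <;> omega) _ _ _ _
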